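-- pv_equiv track=rewrite | github.com/xidulu/pangolin | contrib/auto_vmap.py | find_first_none_consecutive
-- ===== SOURCE A (Python) =====
-- def find_first_none_consecutive(my_list):
--     '''
--     @Author: ChatGPT
--     '''
--     try:
--         # Step 1: Find the index of the first None
--         first_none_index = my_list.index(None)
--     except ValueError:
--         # None is not in the list
--         raise ValueError('No indexed dim found!')
--
--     # Step 2 & 3: Check if None values are consecutive
--     for i in range(first_none_index, len(my_list)):
--         if my_list[i] != None and i + 1 < len(my_list) and my_list[i + 1] == None:
--             # Found a non-None value followed by another None, so they are not consecutive
--             return 0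
--
--     # Step 4: All None values are consecutive
--     return first_none_index
-- ===== SOURCE B (Python) =====
-- def find_first_none_consecutive(my_list):
--     idx = [i for i, x in enumerate(my_list) if x == None]
--     if not idx:
--         raise ValueError('No indexed dim found!')
--     return idx[0] if idx[-1] - idx[0] + 1 == len(idx) else 0
-- ===== Notes on version B (the rewrite author's own statement) =====
-- stated objective: simpler
-- what changed: Replaces the first-find plus index-loop adjacency scan by building the full list of None positions with one comprehension and testing contiguity arithmetically (last - first + 1 == count).
import Mathlib
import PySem

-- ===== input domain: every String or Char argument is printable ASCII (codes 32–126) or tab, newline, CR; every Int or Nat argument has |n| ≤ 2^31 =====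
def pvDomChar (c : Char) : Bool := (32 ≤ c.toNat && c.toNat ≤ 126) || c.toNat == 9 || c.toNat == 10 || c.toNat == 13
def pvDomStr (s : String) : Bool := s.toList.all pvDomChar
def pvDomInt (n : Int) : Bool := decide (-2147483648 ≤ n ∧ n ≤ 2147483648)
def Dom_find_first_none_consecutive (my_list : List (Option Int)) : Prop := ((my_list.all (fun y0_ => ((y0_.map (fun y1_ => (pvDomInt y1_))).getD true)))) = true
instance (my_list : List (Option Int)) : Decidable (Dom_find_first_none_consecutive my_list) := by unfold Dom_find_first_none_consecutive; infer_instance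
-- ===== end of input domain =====

-- B replaces A's first-find plus adjacency index-scan by one comprehension of all None
-- positions and an arithmetic contiguity test (simpler decomposition; same O(n) cost).


-- ===== PORT A =====
-- the 'for i in range(first_none_index, len(my_list))' loop with its early 'return 0'
def pvALoop (my_list : List (Option Int)) (first : Int) : List Int → Int
  | [] => first
  | i :: rest =>
      if PySem.List.pyGetD my_list i none ≠ none ∧ i + 1 < (my_list.length : Int) ∧
         PySem.List.pyGetD my_list (i + 1) none = none
      then 0
      else pvALoop my_list first rest

def find_first_none_consecutive (my_list : List (Option Int)) : Int :=
  match PySem.List.index? my_list none with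
  | none => 0   -- Python raises ValueError('No indexed dim found!') here; excluded by Pre_
  | some k =>
      pvALoop my_list (k : Int) (PySem.List.pyRange (k : Int) (my_list.length : Int) 1)

-- ===== PORT B =====
def find_first_none_consecutive_alt (my_list : List (Option Int)) : Int :=
  let idx : List Int :=
    (PySem.List.enumerate my_list 0).filterMap (fun p => if p.2 = none then some p.1 else none)
  match idx with
  | [] => 0   -- Python raises ValueError('No indexed dim found!') here; excluded by Pre_
  | h :: t =>
      -- idx[-1] on the nonempty idx is its last element
      if (h :: t).getLastD 0 - h + 1 = ((h :: t).length : Int) then h else 0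

-- ===== PRECONDITION & SPEC =====
-- Pre_ excludes exactly the lists containing no None, on which both A and B raise ValueError.
def Pre_find_first_none_consecutive (my_list : List (Option Int)) : Prop := none ∈ my_list
instance (my_list : List (Option Int)) : Decidable (Pre_find_first_none_consecutive my_list) := by unfold Pre_find_first_none_consecutive; infer_instance

def pvWitness_find_first_none_consecutive : List (Option Int) := [some 1, none, none, some 2]

def Spec_find_first_none_consecutive (my_list : List (Option Int)) (out : Int) : Prop := out = find_first_none_consecutive_alt my_list
instance (my_list : List (Option Int)) (out : Int) : Decidable (Spec_find_first_none_consecutive my_list out) := by unfold Spec_find_first_none_consecutive; infer_instance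

-- ===== CLAIM (what is proved, stated in full; the proofs are below) =====
def Claim_equal_find_first_none_consecutive : Prop := ∀ (my_list : List (Option Int)), Dom_find_first_none_consecutive my_list → Pre_find_first_none_consecutive my_list → Spec_find_first_none_consecutive my_list (find_first_none_consecutive my_list)

-- ===== LEMMAS AND PROOFS =====

-- proof-only: positions of None, as the recursion B's comprehension performs
def pvNonePos : List (Option Int) → Int → List Int
  | [], _ => []
  | x :: r, s => if x = none then s :: pvNonePos r (s + 1) else pvNonePos r (s + 1)

-- proof-only: a non-None element immediately followed by a None exists
def pvHasGap : List (Option Int) → Bool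
  | [] => false
  | [_] => false
  | x :: y :: t => (decide (x ≠ none) && decide (y = none)) || pvHasGap (y :: t)

theorem pvNonePos_eq_filterMap (l : List (Option Int)) : ∀ s : Int,
    (PySem.List.enumerate l s).filterMap (fun p => if p.2 = none then some p.1 else none)
      = pvNonePos l s := by
  induction l with
  | nil => intro s; simp [PySem.List.enumerate_nil, pvNonePos]
  | cons x r ih =>
      intro s
      by_cases hx : x = none <;>
        simp [PySem.List.enumerate_cons, hx, pvNonePos, ih]

theorem pvNonePos_eq_nil (l : List (Option Int)) (h : none ∉ l) : ∀ s, pvNonePos l s = [] := by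
  induction l with
  | nil => intro s; rfl
  | cons x r ih =>
      intro s
      simp only [List.mem_cons, not_or] at h
      simp [pvNonePos, Ne.symm h.1, ih h.2]

theorem pvNonePos_ne_nil (l : List (Option Int)) (h : none ∈ l) : ∀ s, pvNonePos l s ≠ [] := by
  induction l with
  | nil => cases h
  | cons x r ih =>
      intro s
      by_cases hx : x = none
      · simp [pvNonePos, hx]
      · rcases List.mem_cons.1 h with h1 | h2
        · exact absurd h1.symm hx
        · simp [pvNonePos, hx, ih h2 (s + 1)]

theorem pvNonePos_split (rest : List (Option Int)) :
    ∀ (pre : List (Option Int)) (s : Int), none ∉ pre →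
      pvNonePos (pre ++ rest) s = pvNonePos rest (s + pre.length) := by
  intro pre
  induction pre with
  | nil => intro s _; simp
  | cons x p ih =>
      intro s h
      simp only [List.mem_cons, not_or] at h
      rw [List.cons_append]
      show pvNonePos (x :: (p ++ rest)) s = _
      simp only [pvNonePos, Ne.symm h.1, if_false]
      rw [ih (s + 1) h.2]
      congr 1
      simp only [List.length_cons]
      push_cast
      ring

-- the last None position is at least s + count - 1
theorem pvNonePos_last_ge (l : List (Option Int)) :
    ∀ s : Int, pvNonePos l s ≠ [] →
      s + ((pvNonePos l s).length : Int) - 1 ≤ (pvNonePos l s).getLastD 0 := by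
  induction l with
  | nil => intro s h; exact absurd rfl h
  | cons x r ih =>
      intro s hne
      by_cases hx : x = none
      · simp only [pvNonePos, hx, if_true]
        rcases h0 : pvNonePos r (s + 1) with _ | ⟨q, qs⟩
        · simp
        · have := ih (s + 1) (by rw [h0]; simp)
          rw [h0] at this
          simp only [List.getLastD_cons, List.length_cons] at this ⊢
          push_cast at this ⊢
          omega
      · simp only [pvNonePos, hx, if_false] at hne ⊢
        have := ih (s + 1) hne
        omega

theorem pvHasGap_of_mem (r : List (Option Int)) :
    ∀ x : Option Int, x ≠ none → none ∈ r → pvHasGap (x :: r) = true := by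
  induction r with
  | nil => intro x _ h; cases h
  | cons y t ih =>
      intro x hx hm
      by_cases hy : y = none
      · simp [pvHasGap, hx, hy]
      · rcases List.mem_cons.1 hm with h1 | h2
        · exact absurd h1.symm hy
        · simp [pvHasGap, ih y hy h2]

theorem pvHasGap_of_not_mem (r : List (Option Int)) :
    ∀ x : Option Int, none ∉ r → pvHasGap (x :: r) = false := by
  induction r with
  | nil => intro x _; rfl
  | cons y t ih =>
      intro x h
      simp only [List.mem_cons, not_or] at h
      simp [pvHasGap, Ne.symm h.1, ih y h.2]

-- KEY: the arithmetic contiguity test of B decides exactly the absence of a gap found by A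
theorem pvKey (suf : List (Option Int)) :
    ∀ s : Int,
      (((s :: pvNonePos suf (s + 1)).getLastD 0 - s + 1
          = ((s :: pvNonePos suf (s + 1)).length : Int))
        ↔ pvHasGap (none :: suf) = false) := by
  induction suf with
  | nil => intro s; simp [pvNonePos, pvHasGap]
  | cons x r ih =>
      intro s
      by_cases hx : x = none
      · subst hx
        have e : pvNonePos (none :: r) (s + 1) = (s + 1) :: pvNonePos r (s + 1 + 1) := by
          simp [pvNonePos]
        rw [e]
        have hiff := ih (s + 1)
        have hg : pvHasGap (none :: none :: r) = pvHasGap (none :: r) := by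
          simp [pvHasGap]
        rw [hg, ← hiff]
        simp only [List.getLastD_cons, List.length_cons]
        constructor <;> intro h <;> push_cast at h ⊢ <;> omega
      · have e : pvNonePos (x :: r) (s + 1) = pvNonePos r (s + 1 + 1) := by
          simp [pvNonePos, hx]
        rw [e]
        by_cases hm : none ∈ r
        · have hne := pvNonePos_ne_nil r hm (s + 1 + 1)
          have hge := pvNonePos_last_ge r (s + 1 + 1) hne
          have hg : pvHasGap (none :: x :: r) = true := by
            simp [pvHasGap, hx, pvHasGap_of_mem r x hx hm]
          rw [hg]
          simp only [List.length_cons]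
          rcases h0 : pvNonePos r (s + 1 + 1) with _ | ⟨q, qs⟩
          · exact absurd h0 hne
          · rw [h0] at hge
            simp only [List.getLastD_cons] at hge ⊢
            constructor
            · intro h; push_cast at h hge; omega
            · intro h; cases h
        · rw [pvNonePos_eq_nil r hm (s + 1 + 1)]
          have hg : pvHasGap (none :: x :: r) = false := by
            have := pvHasGap_of_not_mem r x hm
            simp [pvHasGap, this]
          simp [hg]

-- A's loop over range(a, len) equals the gap test on the dropped suffix
theorem pvALoop_eq (l : List (Option Int)) :
    ∀ n a : ℕ, a + n = l.length → ∀ first : Int,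
      pvALoop l first (PySem.List.pyRange (a : Int) (l.length : Int) 1)
        = if pvHasGap (l.drop a) then 0 else first := by
  intro n
  induction n with
  | zero =>
      intro a ha first
      rw [PySem.List.pyRange_one_eq_nil (by omega)]
      have : l.drop a = [] := List.drop_of_length_le (by omega)
      simp [pvALoop, this, pvHasGap]
  | succ m ih =>
      intro a ha first
      have halt : a < l.length := by omega
      rw [PySem.List.pyRange_one_cons (by exact_mod_cast halt)]
      have hget : PySem.List.pyGetD l (a : Int) none = l[a] := by
        rw [PySem.List.pyGetD_natCast]
        exact List.getD_eq_getElem l none halt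
      have hdrop : l.drop a = l[a] :: l.drop (a + 1) := List.drop_eq_getElem_cons halt
      by_cases h1 : a + 1 < l.length
      · have hget1 : PySem.List.pyGetD l ((a : Int) + 1) none = l[a + 1] := by
          have : ((a : Int) + 1) = ((a + 1 : ℕ) : Int) := by push_cast; ring
          rw [this, PySem.List.pyGetD_natCast]
          exact List.getD_eq_getElem l none h1
        have hdrop1 : l.drop (a + 1) = l[a + 1] :: l.drop (a + 2) :=
          List.drop_eq_getElem_cons h1
        show (if _ then (0 : Int) else _) = _
        rw [hget, hget1]
        have hrec := ih (a + 1) (by omega) first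
        push_cast at hrec
        by_cases hc : l[a] ≠ none ∧ l[a + 1] = none
        · rw [if_pos ⟨hc.1, by exact_mod_cast h1, hc.2⟩]
          rw [hdrop, hdrop1]
          simp only [pvHasGap]
          rw [if_pos]
          simp [hc.1, hc.2]
        · rw [if_neg (by intro hh; exact hc ⟨hh.1, hh.2.2⟩)]
          rw [hrec, hdrop, hdrop1]
          simp only [pvHasGap]
          have : (decide ¬l[a] = none && decide (l[a + 1] = none)) = false := by
            by_cases hz : l[a] = none
            · simp [hz]
            · simp only [hz, not_false_iff, decide_true, Bool.true_and]
              have : ¬ l[a + 1] = none := fun hh => hc ⟨hz, hh⟩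
              simp [this]
          simp [hc]
      · have ha1 : a + 1 = l.length := by omega
        have hd1 : l.drop (a + 1) = [] := List.drop_of_length_le (by omega)
        show (if _ then (0 : Int) else _) = _
        rw [if_neg (by omega)]
        have hrec := ih (a + 1) (by omega) first
        push_cast at hrec
        rw [hrec, hd1, hdrop, hd1]
        simp [pvHasGap]

-- ===== VERDICT (by name: the statement is the Claim_ definition above) =====
theorem find_first_none_consecutive_spec : Claim_equal_find_first_none_consecutive := by
  intro l _ hpre
  unfold Spec_find_first_none_consecutive
  have hmem : none ∈ l := hpre
  obtain ⟨k, hk⟩ := (PySem.List.index?_isSome_iff l none).2 hmem |> fun h => Option.isSome_iff_exists.1 h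
  obtain ⟨pre, suf, hsplit, hlen, hnp⟩ := (PySem.List.index?_eq_some_iff l none k).1 hk
  -- A side
  have hA : find_first_none_consecutive l = if pvHasGap (l.drop k) then 0 else (k : Int) := by
    unfold find_first_none_consecutive
    rw [hk]
    have hkle : k ≤ l.length := by
      subst hsplit; simp [← hlen]
    exact pvALoop_eq l (l.length - k) k (by omega) (k : Int)
  have hdropk : l.drop k = none :: suf := by
    subst hsplit; subst hlen; simp
  -- B side
  have hB : find_first_none_consecutive_alt l
      = if ((k : Int) :: pvNonePos suf ((k : Int) + 1)).getLastD 0 - (k : Int) + 1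
            = (((k : Int) :: pvNonePos suf ((k : Int) + 1)).length : Int)
        then (k : Int) else 0 := by
    unfold find_first_none_consecutive_alt
    rw [pvNonePos_eq_filterMap l 0]
    have : pvNonePos l 0 = (k : Int) :: pvNonePos suf ((k : Int) + 1) := by
      subst hsplit
      rw [pvNonePos_split (none :: suf) pre 0 hnp]
      simp [pvNonePos, hlen]
    rw [this]
  rw [hA, hB, hdropk]
  rcases hkey : pvHasGap (none :: suf) with hf | ht
  · rw [if_neg (by simp), if_pos ((pvKey suf (k : Int)).2 hkey)]
  · rw [if_pos (by simp)]
    rw [if_neg]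
    intro hcontig
    have := (pvKey suf (k : Int)).1 hcontig
    rw [hkey] at this
    cases this
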